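-- pv_equiv track=rewrite | github.com/n3k0fi5t/pythonLearn | misc/parser.py | retrive_attr
-- ===== SOURCE A (Python) =====
-- def retrive_attr(attr_str):
--     pre_split = attr_str.split('-')
--     max_prefix = 0
--     for idx, v in enumerate(pre_split):
--         if len(v):
--             max_prefix = idx
--             break
--     if max_prefix>1:
--         return attr_str[max_prefix:].replace('-','_')
--     elif max_prefix ==1:
--         return attr_str[max_prefix]
--     else:
--         return attr_str
-- ===== SOURCE B (Python) =====
-- def retrive_attr(attr_str):
--     if not attr_str.startswith('-'):
--         return attr_str
--     rest = attr_str[1:]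
--     if not rest.startswith('-'):
--         return rest[0] if rest else attr_str
--     rest = rest[1:]
--     while rest.startswith('-'):
--         rest = rest[1:]
--     return rest.replace('-', '_') if rest else attr_str
-- ===== Notes on version B (the rewrite author's own statement) =====
-- stated objective: simpler
-- what changed: Replaces building the dash-split list and the enumerate-and-break scan with direct case analysis on the prefix pattern (no dash / one dash / two-or-more dashes) via startswith tests and a skip loop, never building a list or counting.
import Mathlib
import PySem

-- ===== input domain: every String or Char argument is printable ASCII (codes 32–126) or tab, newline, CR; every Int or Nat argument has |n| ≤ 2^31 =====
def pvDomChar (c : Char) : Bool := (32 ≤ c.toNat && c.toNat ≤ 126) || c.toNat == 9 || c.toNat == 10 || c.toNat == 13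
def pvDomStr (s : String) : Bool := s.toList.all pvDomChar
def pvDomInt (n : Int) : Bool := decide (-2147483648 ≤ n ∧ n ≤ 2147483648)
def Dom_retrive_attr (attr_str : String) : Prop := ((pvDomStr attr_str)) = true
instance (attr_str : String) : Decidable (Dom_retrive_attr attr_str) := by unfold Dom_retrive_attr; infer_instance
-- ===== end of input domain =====

-- B replaces A's split('-') list and enumerate-and-break scan with a direct case
-- analysis on the prefix pattern (no dash / one dash / two-or-more dashes); no
-- list is built and nothing is counted (objective: simpler).

-- ===== PORT A =====
-- the 'for idx, v in enumerate(pre_split): if len(v): max_prefix = idx; break' loop: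
-- first index whose piece is non-empty, 0 if none (max_prefix starts at 0)
def pvAFind : List String → Int → Int
  | [], _ => 0
  | v :: rest, idx => if PySem.Str.len v ≠ 0 then idx else pvAFind rest (idx + 1)

def retrive_attr (attr_str : String) : String :=
  -- sep "-" is non-empty, so split? never raises; getD [] is unreachable
  let pre_split := (PySem.Str.split? attr_str "-").getD []
  let max_prefix := pvAFind pre_split 0
  if max_prefix > 1 then
    PySem.Str.replace (PySem.Str.slice attr_str (some max_prefix) none) "-" "_"
  else if max_prefix = 1 then
    -- attr_str[1]: max_prefix = 1 forces len ≥ 2, so the index is in range and getD "" is unreachable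
    ((PySem.Str.pyGet? attr_str max_prefix).map (fun c => String.ofList [c])).getD ""
  else attr_str

-- ===== PORT B =====
-- "while rest.startswith('-'): rest = rest[1:]" of Source B
def pvSkipDashes : List Char → List Char
  | [] => []
  | c :: rest => if c = '-' then pvSkipDashes rest else c :: rest

-- Source B ported on the code points: startswith('-') is a head test, s[1:] is the tail,
-- rest[0] the head; exact for the one-character prefix checks Source B performs
def retrive_attr_alt (attr_str : String) : String :=
  match attr_str.toList with
  | [] => attr_str                                 -- not startswith('-')
  | c :: rest =>
    if c ≠ '-' then attr_str                       -- not startswith('-')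
    else
      match rest with
      | [] => attr_str                             -- "rest[0] if rest else attr_str" with rest = ''
      | d :: rest2 =>
        if d ≠ '-' then String.ofList [d]          -- rest[0]
        else
          let tail := pvSkipDashes rest2           -- the while loop
          if tail = [] then attr_str
          else PySem.Str.replace (String.ofList tail) "-" "_"

-- ===== PRECONDITION & SPEC =====
def Spec_retrive_attr (attr_str : String) (out : String) : Prop := out = retrive_attr_alt attr_str
instance (attr_str : String) (out : String) : Decidable (Spec_retrive_attr attr_str out) := by unfold Spec_retrive_attr; infer_instance

-- ===== CLAIM (what is proved, stated in full; the proofs are below) =====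
def Claim_equal_retrive_attr : Prop := ∀ (attr_str : String), Dom_retrive_attr attr_str → Spec_retrive_attr attr_str (retrive_attr attr_str)

-- ===== LEMMAS AND PROOFS =====

-- a cons-onto-the-first-piece helper, and a simple structural model of split('-')
def pvConsF (x : List Char) : List (List Char) → List (List Char)
  | p :: ps => (x ++ p) :: ps
  | [] => [x]

def pvSplit1 : List Char → List (List Char)
  | [] => [[]]
  | c :: rest => if c = '-' then [] :: pvSplit1 rest else pvConsF [c] (pvSplit1 rest)

theorem pvConsF_ne_nil (x : List Char) (ps : List (List Char)) : pvConsF x ps ≠ [] := by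
  cases ps <;> simp [pvConsF]

theorem pvSplit1_ne_nil (l : List Char) : pvSplit1 l ≠ [] := by
  cases l with
  | nil => simp [pvSplit1]
  | cons c rest =>
    simp only [pvSplit1]
    split
    · simp
    · exact pvConsF_ne_nil _ _

theorem pvConsF_nil (ps : List (List Char)) (h : ps ≠ []) : pvConsF [] ps = ps := by
  cases ps with
  | nil => exact absurd rfl h
  | cons p ps' => simp [pvConsF]

theorem pvConsF_consF (x : List Char) (c : Char) (ps : List (List Char)) :
    pvConsF x (pvConsF [c] ps) = pvConsF (x ++ [c]) ps := by
  cases ps <;> simp [pvConsF]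

theorem pv_go_nil (f : Nat) (cur : List Char) (acc : List (List Char)) :
    PySem.Chars.splitOn.go ['-'] (f + 1) [] cur acc = (cur.reverse :: acc).reverse := by
  simp [PySem.Chars.splitOn.go]

theorem pv_go_dash (f : Nat) (l cur : List Char) (acc : List (List Char)) :
    PySem.Chars.splitOn.go ['-'] (f + 1) ('-' :: l) cur acc
      = PySem.Chars.splitOn.go ['-'] f l [] (cur.reverse :: acc) := by
  rw [PySem.Chars.splitOn.go]
  simp [List.isPrefixOf]

theorem pv_go_other (f : Nat) (c : Char) (h : c ≠ '-') (l cur : List Char) (acc : List (List Char)) :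
    PySem.Chars.splitOn.go ['-'] (f + 1) (c :: l) cur acc
      = PySem.Chars.splitOn.go ['-'] f l (c :: cur) acc := by
  rw [PySem.Chars.splitOn.go]
  simp [List.isPrefixOf, Ne.symm h]

theorem pv_go_eq (fuel : Nat) : ∀ (l cur : List Char) (acc : List (List Char)),
    l.length < fuel →
    PySem.Chars.splitOn.go ['-'] fuel l cur acc = acc.reverse ++ pvConsF cur.reverse (pvSplit1 l) := by
  induction fuel with
  | zero => intro l cur acc h; omega
  | succ f ih =>
    intro l cur acc h
    cases l with
    | nil =>
      rw [pv_go_nil]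
      simp [pvSplit1, pvConsF]
    | cons c rest =>
      by_cases hc : c = '-'
      · subst hc
        rw [pv_go_dash, ih rest [] (cur.reverse :: acc) (by simp at h ⊢; omega),
          List.reverse_nil, pvConsF_nil _ (pvSplit1_ne_nil rest)]
        simp [pvSplit1, pvConsF]
      · rw [pv_go_other f c hc, ih rest (c :: cur) acc (by simp at h ⊢; omega)]
        simp [pvSplit1, hc, pvConsF_consF]

theorem pv_splitOn_eq (l : List Char) : PySem.Chars.splitOn l ['-'] = pvSplit1 l := by
  unfold PySem.Chars.splitOn
  rw [pv_go_eq (l.length + 1) l [] [] (by omega)]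
  simp [pvConsF_nil _ (pvSplit1_ne_nil l)]

-- the list-level counterpart of pvAFind
def pvAFindC : List (List Char) → Int → Int
  | [], _ => 0
  | v :: rest, idx => if v.length ≠ 0 then idx else pvAFindC rest (idx + 1)

theorem pvAFind_map (ps : List (List Char)) : ∀ (i : Int),
    pvAFind (ps.map String.ofList) i = pvAFindC ps i := by
  induction ps with
  | nil => intro i; simp [pvAFind, pvAFindC]
  | cons p ps ih =>
    intro i
    simp [pvAFind, pvAFindC, PySem.Str.len, ih]

theorem pvSplit1_replicate (k : Nat) :
    pvSplit1 (List.replicate k '-') = List.replicate (k + 1) [] := by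
  induction k with
  | zero => simp [pvSplit1]
  | succ n ih => simp [List.replicate_succ, pvSplit1, ih]

theorem pvSplit1_replicate_append (k : Nat) (rest : List Char) :
    pvSplit1 (List.replicate k '-' ++ rest) = List.replicate k [] ++ pvSplit1 rest := by
  induction k with
  | zero => simp
  | succ n ih => simp [List.replicate_succ, pvSplit1, ih]

theorem pvAFindC_all_empty (ps : List (List Char)) : (∀ p ∈ ps, p = []) → ∀ (i : Int),
    pvAFindC ps i = 0 := by
  induction ps with
  | nil => intro _ i; simp [pvAFindC]
  | cons p ps ih =>
    intro h i
    have hp : p = [] := h p (by simp)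
    simp only [pvAFindC, hp, List.length_nil]
    rw [if_neg (by simp)]
    exact ih (fun q hq => h q (by simp [hq])) (i + 1)

theorem pvAFindC_replicate (k : Nat) (p : List Char) (hp : p ≠ []) (ps : List (List Char)) :
    ∀ (i : Int), pvAFindC (List.replicate k [] ++ p :: ps) i = i + k := by
  induction k with
  | zero =>
    intro i
    simp [pvAFindC, List.length_eq_zero_iff, hp]
  | succ n ih =>
    intro i
    simp only [List.replicate_succ, List.cons_append, pvAFindC, List.length_nil]
    rw [if_neg (by simp), ih (i + 1)]
    push_cast
    ring

theorem pvSplit1_head_ne_nil (r : Char) (rs : List Char) (hr : r ≠ '-') :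
    ∃ q qs, pvSplit1 (r :: rs) = q :: qs ∧ q ≠ [] := by
  simp only [pvSplit1, hr, if_false]
  cases h : pvSplit1 rs with
  | nil => exact ⟨[r], [], by simp [pvConsF], by simp⟩
  | cons p ps => exact ⟨r :: p, ps, by simp [pvConsF], by simp⟩

theorem pvSkipDashes_replicate (m : Nat) (l : List Char) :
    pvSkipDashes (List.replicate m '-' ++ l) = pvSkipDashes l := by
  induction m with
  | zero => simp
  | succ n ih => simp [List.replicate_succ, pvSkipDashes, ih]

theorem pvSkipDashes_head_ne (r : Char) (rs : List Char) (hr : r ≠ '-') :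
    pvSkipDashes (r :: rs) = r :: rs := by
  simp [pvSkipDashes, hr]

-- both programs rewritten through the (k leading dashes, rest) decomposition of the input
theorem pv_main (attr_str : String) :
    retrive_attr attr_str = retrive_attr_alt attr_str := by
  obtain ⟨k, rest, hdec, hhd⟩ : ∃ (k : Nat) (rest : List Char),
      attr_str.toList = List.replicate k '-' ++ rest ∧ ∀ r ∈ rest.head?, r ≠ '-' := by
    refine ⟨(attr_str.toList.takeWhile (fun c => decide (c = '-'))).length,
      attr_str.toList.dropWhile (fun c => decide (c = '-')), ?_, ?_⟩
    · conv_lhs => rw [← List.takeWhile_append_dropWhile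
        (p := fun c => decide (c = '-')) (l := attr_str.toList)]
      congr 1
      rw [List.eq_replicate_iff]
      refine ⟨rfl, fun b hb => ?_⟩
      have := List.mem_takeWhile_imp hb
      simpa using this
    · intro r hr
      have hne : attr_str.toList.dropWhile (fun c => decide (c = '-')) ≠ [] := by
        intro h0; rw [h0] at hr; simp at hr
      have hnot := List.head_dropWhile_not (fun c => decide (c = '-')) hne
      have hhead : (attr_str.toList.dropWhile (fun c => decide (c = '-'))).head hne = r := by
        rw [List.head_eq_iff_head?_eq_some]; exact hr
      rw [hhead] at hnot
      simpa using hnot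
  have hsplit : (PySem.Str.split? attr_str "-").getD []
      = (pvSplit1 attr_str.toList).map String.ofList := by
    simp [PySem.Str.split?, PySem.Chars.split?, pv_splitOn_eq]
  have hlen : attr_str.toList.length = k + rest.length := by rw [hdec]; simp
  cases rest with
  | nil =>
    -- all dashes (or empty): A's scan finds no non-empty piece, B falls through to attr_str
    have hfind : pvAFind ((PySem.Str.split? attr_str "-").getD []) 0 = 0 := by
      rw [hsplit, pvAFind_map]
      apply pvAFindC_all_empty
      intro p hp
      rw [hdec, List.append_nil, pvSplit1_replicate] at hp
      exact List.eq_of_mem_replicate hp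
    have hA : retrive_attr attr_str = attr_str := by
      simp only [retrive_attr]
      rw [hfind]
      norm_num
    rw [hA]
    rw [List.append_nil] at hdec
    simp only [retrive_attr_alt, hdec]
    match k with
    | 0 => simp
    | 1 => simp [List.replicate_succ]
    | m + 2 =>
      simp only [List.replicate_succ]
      rw [show List.replicate m '-' = List.replicate m '-' ++ [] by simp,
        pvSkipDashes_replicate]
      simp [pvSkipDashes]
  | cons r rs =>
    have hrne : r ≠ '-' := hhd r (by simp)
    obtain ⟨q, qs, hq, hqne⟩ := pvSplit1_head_ne_nil r rs hrne
    have hfind : pvAFind ((PySem.Str.split? attr_str "-").getD []) 0 = (k : Int) := by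
      rw [hsplit, pvAFind_map, hdec, pvSplit1_replicate_append, hq,
        pvAFindC_replicate k q hqne qs 0]
      ring
    have hslice : PySem.Str.slice attr_str (some (k : Int)) none = String.ofList (r :: rs) := by
      unfold PySem.Str.slice
      congr 1
      rw [PySem.Chars.slice_eq_listSlice, PySem.List.slice_from_natCast, hdec]
      simp
    simp only [retrive_attr, retrive_attr_alt]
    rw [hfind, hdec]
    match k with
    | 0 =>
      norm_num
      simp [hrne]
    | 1 =>
      norm_num
      have hcs1 : attr_str.toList = '-' :: r :: rs := by rw [hdec]; rfl
      have hA : PySem.List.pyGet? attr_str.toList 1 = some r := by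
        simp [hcs1, PySem.List.pyGet?, PySem.List.pyIdx?]
      rw [hA]
      simp [hrne]
    | m + 2 =>
      rw [if_pos (by push_cast; omega)]
      rw [hslice]
      simp only [List.replicate_succ, List.cons_append]
      rw [if_neg (by simp), pvSkipDashes_replicate, pvSkipDashes_head_ne r rs hrne]
      simp

-- ===== VERDICT (by name: the statement is the Claim_ definition above) =====
theorem retrive_attr_spec : Claim_equal_retrive_attr := by
  intro attr_str _
  unfold Spec_retrive_attr
  exact pv_main attr_str
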